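-- pv_equiv track=rewrite | github.com/aalacy/storelocatore-scrapers | apify/CalinClaudiu/storelocator/maxi_ca/scrape.py | fix_comma
-- ===== SOURCE A (Python) =====
-- def fix_comma(x):
--     h = []
--
--     x = x.replace("None", "")
--     try:
--         x = x.split(",")
--         for i in x:
--             if len(i) > 1 or any(char.isdigit() for char in i):
--                 h.append(i)
--         h = ", ".join(h)
--     except:
--         h = x
--
--     if len(h) < 2:
--         h = "<MISSING>"
--
--     if "MFC HIGH TECH" in h:
--         h = fix_comma(h.replace("MFC HIGH TECH", "").strip())
--
--     if "MORRISBURG SHOPPING PLAZA" in h: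
--         h = fix_comma(h.replace("MORRISBURG SHOPPING PLAZA", "").strip())
--
--     if "MFC SCARBOROUGH" in h:
--         h = fix_comma(h.replace("MFC SCARBOROUGH", "").strip())
--
--     if "MFC MCCOWAN" in h:
--         h = fix_comma(h.replace("MFC MCCOWAN", "").strip())
--
--     if "MFC GLEN ERIN" in h:
--         h = fix_comma(h.replace("MFC GLEN ERIN", "").strip())
--
--     if "Morrisburg Shopping Plaza" in h:
--         h = fix_comma(h.replace("Morrisburg Shopping Plaza", "").strip())
--
--     if "MFC Glen Erin" in h:
--         h = fix_comma(h.replace("MFC Glen Erin", "").strip())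
--
--     if "MFC High Tech" in h:
--         h = fix_comma(h.replace("MFC High Tech", "").strip())
--
--     if "Pearlgate Plaza" in h:
--         h = fix_comma(h.replace("Pearlgate Plaza", "").strip())
--
--     if "MFC Scarborough" in h:
--         h = fix_comma(h.replace("MFC Scarborough", "").strip())
--
--     if "MFC McCowan" in h:
--         h = fix_comma(h.replace("MFC McCowan", "").strip())
--
--     return h.strip()
-- ===== SOURCE B (Python) =====
-- PHRASES = ["MFC HIGH TECH", "MORRISBURG SHOPPING PLAZA", "MFC SCARBOROUGH",
--            "MFC MCCOWAN", "MFC GLEN ERIN", "Morrisburg Shopping Plaza",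
--            "MFC Glen Erin", "MFC High Tech", "Pearlgate Plaza",
--            "MFC Scarborough", "MFC McCowan"]
--
--
-- def _clean(x):
--     toks = [t for t in x.replace("None", "").split(",")
--             if len(t) > 1 or any(c.isdigit() for c in t)]
--     h = ", ".join(toks)
--     return h if len(h) >= 2 else "<MISSING>"
--
--
-- def fix_comma(x):
--     while True:
--         h = _clean(x)
--         p = next((p for p in PHRASES if p in h), None)
--         if p is None:
--             return h.strip()
--         x = h.replace(p, "").strip()
-- ===== Notes on version B (the rewrite author's own statement) =====
-- stated objective: simpler
-- what changed: A's self-recursion with eleven copy-pasted if/replace/recurse blocks is replaced by a while-loop over a phrase table: each iteration cleans the current string and removes the first listed phrase present, looping until none remains.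
import Mathlib
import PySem

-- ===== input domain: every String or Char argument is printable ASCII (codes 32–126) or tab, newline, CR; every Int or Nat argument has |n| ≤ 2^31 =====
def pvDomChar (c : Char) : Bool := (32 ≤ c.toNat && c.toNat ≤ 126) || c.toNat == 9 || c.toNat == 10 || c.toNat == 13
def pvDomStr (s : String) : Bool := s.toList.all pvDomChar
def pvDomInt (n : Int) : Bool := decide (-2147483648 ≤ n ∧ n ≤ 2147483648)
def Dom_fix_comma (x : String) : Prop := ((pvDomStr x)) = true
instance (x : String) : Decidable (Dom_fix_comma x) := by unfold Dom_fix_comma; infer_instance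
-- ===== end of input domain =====

-- B replaces A's self-recursion with eleven copy-pasted removal branches by a while-loop
-- driven by a phrase table (the same clean-then-remove-first-phrase recurrence), for simplicity.
-- Both ports use fuel (input length + 1) only as a totality guard for Lean's termination
-- checker; each recursive call strictly removes at least ten non-space characters, so the
-- guard value is never reached on any input and both ports compute their Python's value.

-- ===== PORT A =====
-- One Python statement `if "P" in h: h = fix_comma(h.replace("P", "").strip())`
-- (rec = the recursive call at the current depth):
def fixCommaIf (rec : List Char → List Char) (P h : List Char) : List Char :=
  if PySem.Chars.isIn P h then rec (PySem.Chars.strip (PySem.Chars.replace h P [])) else h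

-- A's try/except around split/join can never fire (neither raises), so it is not ported.
def fixCommaGoA : Nat → List Char → List Char
  | 0, _ => "<MISSING>".toList
  | f + 1, x =>
    let x1 := PySem.Chars.replace x "None".toList []
    let parts := PySem.Chars.splitOn x1 ",".toList
    let h0 := PySem.Chars.join ", ".toList
      (parts.foldl (fun h i =>
        if PySem.Chars.len i > 1 || i.any PySem.Chars.isdigit then h ++ [i] else h) [])
    let h1 := if PySem.Chars.len h0 < 2 then "<MISSING>".toList else h0
    let h2 := fixCommaIf (fun y => fixCommaGoA f y) "MFC HIGH TECH".toList h1
    let h3 := fixCommaIf (fun y => fixCommaGoA f y) "MORRISBURG SHOPPING PLAZA".toList h2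
    let h4 := fixCommaIf (fun y => fixCommaGoA f y) "MFC SCARBOROUGH".toList h3
    let h5 := fixCommaIf (fun y => fixCommaGoA f y) "MFC MCCOWAN".toList h4
    let h6 := fixCommaIf (fun y => fixCommaGoA f y) "MFC GLEN ERIN".toList h5
    let h7 := fixCommaIf (fun y => fixCommaGoA f y) "Morrisburg Shopping Plaza".toList h6
    let h8 := fixCommaIf (fun y => fixCommaGoA f y) "MFC Glen Erin".toList h7
    let h9 := fixCommaIf (fun y => fixCommaGoA f y) "MFC High Tech".toList h8
    let h10 := fixCommaIf (fun y => fixCommaGoA f y) "Pearlgate Plaza".toList h9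
    let h11 := fixCommaIf (fun y => fixCommaGoA f y) "MFC Scarborough".toList h10
    let h12 := fixCommaIf (fun y => fixCommaGoA f y) "MFC McCowan".toList h11
    PySem.Chars.strip h12

def fix_comma (x : String) : String :=
  String.ofList (fixCommaGoA (x.toList.length + 1) x.toList)

-- ===== PORT B =====
def pvPhrases : List (List Char) :=
  ["MFC HIGH TECH".toList, "MORRISBURG SHOPPING PLAZA".toList, "MFC SCARBOROUGH".toList,
   "MFC MCCOWAN".toList, "MFC GLEN ERIN".toList, "Morrisburg Shopping Plaza".toList,
   "MFC Glen Erin".toList, "MFC High Tech".toList, "Pearlgate Plaza".toList,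
   "MFC Scarborough".toList, "MFC McCowan".toList]

def fixCommaClean (x : List Char) : List Char :=
  let toks := (PySem.Chars.splitOn (PySem.Chars.replace x "None".toList []) ",".toList).filter
      (fun t => PySem.Chars.len t > 1 || t.any PySem.Chars.isdigit)
  let h := PySem.Chars.join ", ".toList toks
  if 2 ≤ PySem.Chars.len h then h else "<MISSING>".toList

def fixCommaGoB : Nat → List Char → List Char
  | 0, _ => "<MISSING>".toList
  | f + 1, x =>
    let h := fixCommaClean x
    match pvPhrases.find? (fun p => PySem.Chars.isIn p h) with
    | none => PySem.Chars.strip h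
    | some p => fixCommaGoB f (PySem.Chars.strip (PySem.Chars.replace h p []))

def fix_comma_alt (x : String) : String :=
  String.ofList (fixCommaGoB (x.toList.length + 1) x.toList)

-- ===== PRECONDITION & SPEC =====
def Spec_fix_comma (x : String) (out : String) : Prop := out = fix_comma_alt x
instance (x : String) (out : String) : Decidable (Spec_fix_comma x out) := by unfold Spec_fix_comma; infer_instance

-- ===== CLAIM (what is proved, stated in full; the proofs are below) =====
def Claim_equal_fix_comma : Prop := ∀ (x : String), Dom_fix_comma x → Spec_fix_comma x (fix_comma x)

-- ===== LEMMAS AND PROOFS =====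

lemma pv_rstrip_prefix (l : List Char) : PySem.Chars.rstrip l <+: l := by
  unfold PySem.Chars.rstrip
  exact List.reverse_suffix.mp (by simpa using List.dropWhile_suffix (l := l.reverse) PySem.Chars.isspace)

lemma pv_strip_infix (l : List Char) : PySem.Chars.strip l <:+: l := by
  unfold PySem.Chars.strip
  exact ((pv_rstrip_prefix _).isInfix).trans (List.dropWhile_suffix _).isInfix

lemma pv_lstrip_of_prefix {m l : List Char} (hp : m <+: l)
    (hl : PySem.Chars.lstrip l = l) : PySem.Chars.lstrip m = m := by
  unfold PySem.Chars.lstrip at *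
  cases m with
  | nil => rfl
  | cons c t =>
    obtain ⟨r, rfl⟩ := hp
    have hc : PySem.Chars.isspace c = false := by
      by_contra hcc
      simp only [Bool.not_eq_false] at hcc
      rw [List.cons_append, List.dropWhile_cons, if_pos hcc] at hl
      have hle := (List.dropWhile_suffix (l := t ++ r) PySem.Chars.isspace).length_le
      have h2 := congrArg List.length hl
      simp only [List.length_cons] at h2
      omega
    rw [List.dropWhile_cons, if_neg (by simp [hc])]

lemma pv_strip_idem (l : List Char) :
    PySem.Chars.strip (PySem.Chars.strip l) = PySem.Chars.strip l := by
  unfold PySem.Chars.strip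
  have h1 : PySem.Chars.lstrip (PySem.Chars.rstrip (PySem.Chars.lstrip l)) = PySem.Chars.rstrip (PySem.Chars.lstrip l) := by
    apply pv_lstrip_of_prefix (pv_rstrip_prefix _)
    unfold PySem.Chars.lstrip
    exact List.dropWhile_idempotent _ _
  rw [h1]
  unfold PySem.Chars.rstrip
  rw [List.reverse_reverse, List.dropWhile_idempotent]

lemma pv_isIn_strip_false {p l : List Char} (h : PySem.Chars.isIn p l = false) :
    PySem.Chars.isIn p (PySem.Chars.strip l) = false := by
  rw [PySem.Chars.isIn_eq_false_iff] at h ⊢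
  exact fun hinf => h (hinf.trans (pv_strip_infix l))

lemma pv_goB_strip (f : Nat) (x : List Char) :
    PySem.Chars.strip (fixCommaGoB f x) = fixCommaGoB f x := by
  induction f generalizing x with
  | zero => rw [fixCommaGoB]; decide
  | succ f ih =>
    rw [fixCommaGoB]
    cases hf : pvPhrases.find? (fun p => PySem.Chars.isIn p (fixCommaClean x)) with
    | none => simp only [pv_strip_idem]
    | some p => simp only [ih]

lemma pv_goB_free (f : Nat) (x : List Char) :
    ∀ p ∈ pvPhrases, PySem.Chars.isIn p (fixCommaGoB f x) = false := by
  induction f generalizing x with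
  | zero => intro p hp; rw [fixCommaGoB]; revert p hp; decide
  | succ f ih =>
    intro p hp
    rw [fixCommaGoB]
    cases hf : pvPhrases.find? (fun q => PySem.Chars.isIn q (fixCommaClean x)) with
    | none =>
      exact pv_isIn_strip_false (by simpa using List.find?_eq_none.mp hf p hp)
    | some q => exact ih _ p hp

lemma pv_clean_if (h : List Char) :
    (if PySem.Chars.len h < 2 then "<MISSING>".toList else h)
      = if 2 ≤ PySem.Chars.len h then h else "<MISSING>".toList := by
  split_ifs with a b <;> first | rfl | omega

lemma pv_if_skip (rec : List Char → List Char) {P h : List Char}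
    (hP : PySem.Chars.isIn P h = false) : fixCommaIf rec P h = h := by
  rw [fixCommaIf, hP]; simp

lemma pv_if_fire (rec : List Char → List Char) {P h : List Char}
    (hP : PySem.Chars.isIn P h = true) :
    fixCommaIf rec P h = rec (PySem.Chars.strip (PySem.Chars.replace h P [])) := by
  rw [fixCommaIf, hP]; simp

lemma pv_free2 (f : Nat) (y : List Char) :
    PySem.Chars.isIn "MORRISBURG SHOPPING PLAZA".toList (fixCommaGoB f y) = false :=
  pv_goB_free f y _ (by decide)

lemma pv_free3 (f : Nat) (y : List Char) :
    PySem.Chars.isIn "MFC SCARBOROUGH".toList (fixCommaGoB f y) = false :=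
  pv_goB_free f y _ (by decide)

lemma pv_free4 (f : Nat) (y : List Char) :
    PySem.Chars.isIn "MFC MCCOWAN".toList (fixCommaGoB f y) = false :=
  pv_goB_free f y _ (by decide)

lemma pv_free5 (f : Nat) (y : List Char) :
    PySem.Chars.isIn "MFC GLEN ERIN".toList (fixCommaGoB f y) = false :=
  pv_goB_free f y _ (by decide)

lemma pv_free6 (f : Nat) (y : List Char) :
    PySem.Chars.isIn "Morrisburg Shopping Plaza".toList (fixCommaGoB f y) = false :=
  pv_goB_free f y _ (by decide)

lemma pv_free7 (f : Nat) (y : List Char) :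
    PySem.Chars.isIn "MFC Glen Erin".toList (fixCommaGoB f y) = false :=
  pv_goB_free f y _ (by decide)

lemma pv_free8 (f : Nat) (y : List Char) :
    PySem.Chars.isIn "MFC High Tech".toList (fixCommaGoB f y) = false :=
  pv_goB_free f y _ (by decide)

lemma pv_free9 (f : Nat) (y : List Char) :
    PySem.Chars.isIn "Pearlgate Plaza".toList (fixCommaGoB f y) = false :=
  pv_goB_free f y _ (by decide)

lemma pv_free10 (f : Nat) (y : List Char) :
    PySem.Chars.isIn "MFC Scarborough".toList (fixCommaGoB f y) = false :=
  pv_goB_free f y _ (by decide)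

lemma pv_free11 (f : Nat) (y : List Char) :
    PySem.Chars.isIn "MFC McCowan".toList (fixCommaGoB f y) = false :=
  pv_goB_free f y _ (by decide)

lemma pv_chain_eq (f : Nat) (ih : ∀ y, fixCommaGoA f y = fixCommaGoB f y) (h : List Char) :
    PySem.Chars.strip
      (fixCommaIf (fun y => fixCommaGoA f y) "MFC McCowan".toList (fixCommaIf (fun y => fixCommaGoA f y) "MFC Scarborough".toList (fixCommaIf (fun y => fixCommaGoA f y) "Pearlgate Plaza".toList (fixCommaIf (fun y => fixCommaGoA f y) "MFC High Tech".toList (fixCommaIf (fun y => fixCommaGoA f y) "MFC Glen Erin".toList (fixCommaIf (fun y => fixCommaGoA f y) "Morrisburg Shopping Plaza".toList (fixCommaIf (fun y => fixCommaGoA f y) "MFC GLEN ERIN".toList (fixCommaIf (fun y => fixCommaGoA f y) "MFC MCCOWAN".toList (fixCommaIf (fun y => fixCommaGoA f y) "MFC SCARBOROUGH".toList (fixCommaIf (fun y => fixCommaGoA f y) "MORRISBURG SHOPPING PLAZA".toList (fixCommaIf (fun y => fixCommaGoA f y) "MFC HIGH TECH".toList h)))))))))))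
      = match pvPhrases.find? (fun p => PySem.Chars.isIn p h) with
      | none => PySem.Chars.strip h
      | some p => fixCommaGoB f (PySem.Chars.strip (PySem.Chars.replace h p [])) := by
  by_cases c1 : PySem.Chars.isIn "MFC HIGH TECH".toList h = true
  case pos =>
    rw [pv_if_fire _ c1, ih]
    simp only [pv_free2, pv_free3, pv_free4, pv_free5, pv_free6, pv_free7, pv_free8, pv_free9, pv_free10, pv_free11, pv_if_skip, pv_goB_strip]
    rw [pvPhrases, List.find?_cons_of_pos (by simpa using c1)]
  case neg =>
    simp only [Bool.not_eq_true] at c1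
    by_cases c2 : PySem.Chars.isIn "MORRISBURG SHOPPING PLAZA".toList h = true
    case pos =>
      rw [pv_if_skip _ c1, pv_if_fire _ c2, ih]
      simp only [pv_free3, pv_free4, pv_free5, pv_free6, pv_free7, pv_free8, pv_free9, pv_free10, pv_free11, pv_if_skip, pv_goB_strip]
      rw [pvPhrases, List.find?_cons_of_neg (by simpa using c1), List.find?_cons_of_pos (by simpa using c2)]
    case neg =>
      simp only [Bool.not_eq_true] at c2
      by_cases c3 : PySem.Chars.isIn "MFC SCARBOROUGH".toList h = true
      case pos =>
        rw [pv_if_skip _ c1, pv_if_skip _ c2, pv_if_fire _ c3, ih]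
        simp only [pv_free4, pv_free5, pv_free6, pv_free7, pv_free8, pv_free9, pv_free10, pv_free11, pv_if_skip, pv_goB_strip]
        rw [pvPhrases, List.find?_cons_of_neg (by simpa using c1), List.find?_cons_of_neg (by simpa using c2), List.find?_cons_of_pos (by simpa using c3)]
      case neg =>
        simp only [Bool.not_eq_true] at c3
        by_cases c4 : PySem.Chars.isIn "MFC MCCOWAN".toList h = true
        case pos =>
          rw [pv_if_skip _ c1, pv_if_skip _ c2, pv_if_skip _ c3, pv_if_fire _ c4, ih]
          simp only [pv_free5, pv_free6, pv_free7, pv_free8, pv_free9, pv_free10, pv_free11, pv_if_skip, pv_goB_strip]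
          rw [pvPhrases, List.find?_cons_of_neg (by simpa using c1), List.find?_cons_of_neg (by simpa using c2), List.find?_cons_of_neg (by simpa using c3), List.find?_cons_of_pos (by simpa using c4)]
        case neg =>
          simp only [Bool.not_eq_true] at c4
          by_cases c5 : PySem.Chars.isIn "MFC GLEN ERIN".toList h = true
          case pos =>
            rw [pv_if_skip _ c1, pv_if_skip _ c2, pv_if_skip _ c3, pv_if_skip _ c4, pv_if_fire _ c5, ih]
            simp only [pv_free6, pv_free7, pv_free8, pv_free9, pv_free10, pv_free11, pv_if_skip, pv_goB_strip]
            rw [pvPhrases, List.find?_cons_of_neg (by simpa using c1), List.find?_cons_of_neg (by simpa using c2), List.find?_cons_of_neg (by simpa using c3), List.find?_cons_of_neg (by simpa using c4), List.find?_cons_of_pos (by simpa using c5)]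
          case neg =>
            simp only [Bool.not_eq_true] at c5
            by_cases c6 : PySem.Chars.isIn "Morrisburg Shopping Plaza".toList h = true
            case pos =>
              rw [pv_if_skip _ c1, pv_if_skip _ c2, pv_if_skip _ c3, pv_if_skip _ c4, pv_if_skip _ c5, pv_if_fire _ c6, ih]
              simp only [pv_free7, pv_free8, pv_free9, pv_free10, pv_free11, pv_if_skip, pv_goB_strip]
              rw [pvPhrases, List.find?_cons_of_neg (by simpa using c1), List.find?_cons_of_neg (by simpa using c2), List.find?_cons_of_neg (by simpa using c3), List.find?_cons_of_neg (by simpa using c4), List.find?_cons_of_neg (by simpa using c5), List.find?_cons_of_pos (by simpa using c6)]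
            case neg =>
              simp only [Bool.not_eq_true] at c6
              by_cases c7 : PySem.Chars.isIn "MFC Glen Erin".toList h = true
              case pos =>
                rw [pv_if_skip _ c1, pv_if_skip _ c2, pv_if_skip _ c3, pv_if_skip _ c4, pv_if_skip _ c5, pv_if_skip _ c6, pv_if_fire _ c7, ih]
                simp only [pv_free8, pv_free9, pv_free10, pv_free11, pv_if_skip, pv_goB_strip]
                rw [pvPhrases, List.find?_cons_of_neg (by simpa using c1), List.find?_cons_of_neg (by simpa using c2), List.find?_cons_of_neg (by simpa using c3), List.find?_cons_of_neg (by simpa using c4), List.find?_cons_of_neg (by simpa using c5), List.find?_cons_of_neg (by simpa using c6), List.find?_cons_of_pos (by simpa using c7)]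
              case neg =>
                simp only [Bool.not_eq_true] at c7
                by_cases c8 : PySem.Chars.isIn "MFC High Tech".toList h = true
                case pos =>
                  rw [pv_if_skip _ c1, pv_if_skip _ c2, pv_if_skip _ c3, pv_if_skip _ c4, pv_if_skip _ c5, pv_if_skip _ c6, pv_if_skip _ c7, pv_if_fire _ c8, ih]
                  simp only [pv_free9, pv_free10, pv_free11, pv_if_skip, pv_goB_strip]
                  rw [pvPhrases, List.find?_cons_of_neg (by simpa using c1), List.find?_cons_of_neg (by simpa using c2), List.find?_cons_of_neg (by simpa using c3), List.find?_cons_of_neg (by simpa using c4), List.find?_cons_of_neg (by simpa using c5), List.find?_cons_of_neg (by simpa using c6), List.find?_cons_of_neg (by simpa using c7), List.find?_cons_of_pos (by simpa using c8)]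
                case neg =>
                  simp only [Bool.not_eq_true] at c8
                  by_cases c9 : PySem.Chars.isIn "Pearlgate Plaza".toList h = true
                  case pos =>
                    rw [pv_if_skip _ c1, pv_if_skip _ c2, pv_if_skip _ c3, pv_if_skip _ c4, pv_if_skip _ c5, pv_if_skip _ c6, pv_if_skip _ c7, pv_if_skip _ c8, pv_if_fire _ c9, ih]
                    simp only [pv_free10, pv_free11, pv_if_skip, pv_goB_strip]
                    rw [pvPhrases, List.find?_cons_of_neg (by simpa using c1), List.find?_cons_of_neg (by simpa using c2), List.find?_cons_of_neg (by simpa using c3), List.find?_cons_of_neg (by simpa using c4), List.find?_cons_of_neg (by simpa using c5), List.find?_cons_of_neg (by simpa using c6), List.find?_cons_of_neg (by simpa using c7), List.find?_cons_of_neg (by simpa using c8), List.find?_cons_of_pos (by simpa using c9)]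
                  case neg =>
                    simp only [Bool.not_eq_true] at c9
                    by_cases c10 : PySem.Chars.isIn "MFC Scarborough".toList h = true
                    case pos =>
                      rw [pv_if_skip _ c1, pv_if_skip _ c2, pv_if_skip _ c3, pv_if_skip _ c4, pv_if_skip _ c5, pv_if_skip _ c6, pv_if_skip _ c7, pv_if_skip _ c8, pv_if_skip _ c9, pv_if_fire _ c10, ih]
                      simp only [pv_free11, pv_if_skip, pv_goB_strip]
                      rw [pvPhrases, List.find?_cons_of_neg (by simpa using c1), List.find?_cons_of_neg (by simpa using c2), List.find?_cons_of_neg (by simpa using c3), List.find?_cons_of_neg (by simpa using c4), List.find?_cons_of_neg (by simpa using c5), List.find?_cons_of_neg (by simpa using c6), List.find?_cons_of_neg (by simpa using c7), List.find?_cons_of_neg (by simpa using c8), List.find?_cons_of_neg (by simpa using c9), List.find?_cons_of_pos (by simpa using c10)]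
                    case neg =>
                      simp only [Bool.not_eq_true] at c10
                      by_cases c11 : PySem.Chars.isIn "MFC McCowan".toList h = true
                      case pos =>
                        rw [pv_if_skip _ c1, pv_if_skip _ c2, pv_if_skip _ c3, pv_if_skip _ c4, pv_if_skip _ c5, pv_if_skip _ c6, pv_if_skip _ c7, pv_if_skip _ c8, pv_if_skip _ c9, pv_if_skip _ c10, pv_if_fire _ c11, ih]
                        simp only [pv_goB_strip]
                        rw [pvPhrases, List.find?_cons_of_neg (by simpa using c1), List.find?_cons_of_neg (by simpa using c2), List.find?_cons_of_neg (by simpa using c3), List.find?_cons_of_neg (by simpa using c4), List.find?_cons_of_neg (by simpa using c5), List.find?_cons_of_neg (by simpa using c6), List.find?_cons_of_neg (by simpa using c7), List.find?_cons_of_neg (by simpa using c8), List.find?_cons_of_neg (by simpa using c9), List.find?_cons_of_neg (by simpa using c10), List.find?_cons_of_pos (by simpa using c11)]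
                      case neg =>
                        simp only [Bool.not_eq_true] at c11
                        rw [pv_if_skip _ c1, pv_if_skip _ c2, pv_if_skip _ c3, pv_if_skip _ c4, pv_if_skip _ c5, pv_if_skip _ c6, pv_if_skip _ c7, pv_if_skip _ c8, pv_if_skip _ c9, pv_if_skip _ c10, pv_if_skip _ c11]
                        rw [pvPhrases, List.find?_cons_of_neg (by simpa using c1), List.find?_cons_of_neg (by simpa using c2), List.find?_cons_of_neg (by simpa using c3), List.find?_cons_of_neg (by simpa using c4), List.find?_cons_of_neg (by simpa using c5), List.find?_cons_of_neg (by simpa using c6), List.find?_cons_of_neg (by simpa using c7), List.find?_cons_of_neg (by simpa using c8), List.find?_cons_of_neg (by simpa using c9), List.find?_cons_of_neg (by simpa using c10), List.find?_cons_of_neg (by simpa using c11)]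
                        rfl

lemma pv_goA_eq_goB (f : Nat) (x : List Char) : fixCommaGoA f x = fixCommaGoB f x := by
  induction f generalizing x with
  | zero => rw [fixCommaGoA, fixCommaGoB]
  | succ f ih =>
    rw [fixCommaGoA, fixCommaGoB]
    simp only [PySem.List.foldl_append_if
        (fun i => PySem.Chars.len i > 1 || i.any PySem.Chars.isdigit) (fun i => i),
      List.nil_append, pv_clean_if]
    rw [fixCommaClean]
    simp only [List.map_id']
    exact pv_chain_eq f ih _

-- ===== VERDICT (by name: the statement is the Claim_ definition above) =====
theorem fix_comma_spec : Claim_equal_fix_comma := by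
  intro x _
  unfold Spec_fix_comma fix_comma fix_comma_alt
  rw [pv_goA_eq_goB]
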